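-- pv_equiv track=rewrite | github.com/cloudthecrowd/Practice | Func_old_macdonald.py | old_macdonald
-- ===== SOURCE A (Python) =====
-- def old_macdonald(name):
--     newStr=''
--     for i in range(len(name)):
--         if i==0:
--             newStr+=name[i].upper()
--         elif i==3:
--             newStr+=name[i].upper()
--         else:
--             newStr+=name[i].lower()
--     return newStr
-- ===== SOURCE B (Python) =====
-- def old_macdonald(name):
--     return name[:1].upper() + name[1:3].lower() + name[3:4].upper() + name[4:].lower()
-- ===== Notes on version B (the rewrite author's own statement) =====
-- stated objective: simpler
-- what changed: Replaced the per-index loop with if/elif/else branching by a single closed-form expression over four slices (first char, chars 1-2, char 3, remainder) with upper/lower applied per chunk.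
import Mathlib
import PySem

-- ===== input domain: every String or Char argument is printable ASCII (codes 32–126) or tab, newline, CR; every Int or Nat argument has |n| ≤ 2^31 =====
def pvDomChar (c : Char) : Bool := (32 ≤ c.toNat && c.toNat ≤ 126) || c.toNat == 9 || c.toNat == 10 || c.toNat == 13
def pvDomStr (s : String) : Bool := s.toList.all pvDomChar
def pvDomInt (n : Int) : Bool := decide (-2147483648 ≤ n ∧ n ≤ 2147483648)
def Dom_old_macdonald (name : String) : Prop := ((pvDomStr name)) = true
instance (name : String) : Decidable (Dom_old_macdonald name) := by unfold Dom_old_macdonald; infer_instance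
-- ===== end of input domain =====

-- B replaces A's per-index loop with if/elif branches by one closed-form concatenation of four slices (upper/lower per chunk); same O(n) cost, simpler.


-- ===== PORT A =====
-- A's loop body: for i in range(len(name)): if i==0 / elif i==3: upper else lower, appended to newStr
def pvBodyA (cs : List Char) (newStr : List Char) (i : Int) : List Char :=
  if i == 0 then newStr ++ [PySem.Chars.upperChar (PySem.List.pyGetD cs i ' ')]
  else if i == 3 then newStr ++ [PySem.Chars.upperChar (PySem.List.pyGetD cs i ' ')]
  else newStr ++ [PySem.Chars.lowerChar (PySem.List.pyGetD cs i ' ')]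

def old_macdonald (name : String) : String :=
  let cs := name.toList
  String.ofList ((PySem.List.pyRange 0 (cs.length : Int) 1).foldl (pvBodyA cs) [])

-- ===== PORT B =====
def old_macdonald_alt (name : String) : String :=
  let cs := name.toList
  String.ofList (PySem.Chars.upper (PySem.List.slice cs none (some 1))
    ++ PySem.Chars.lower (PySem.List.slice cs (some 1) (some 3))
    ++ PySem.Chars.upper (PySem.List.slice cs (some 3) (some 4))
    ++ PySem.Chars.lower (PySem.List.slice cs (some 4) none))

-- ===== PRECONDITION & SPEC =====
def Spec_old_macdonald (name : String) (out : String) : Prop := out = old_macdonald_alt name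
instance (name : String) (out : String) : Decidable (Spec_old_macdonald name out) := by unfold Spec_old_macdonald; infer_instance

-- ===== CLAIM (what is proved, stated in full; the proofs are below) =====
def Claim_equal_old_macdonald : Prop := ∀ (name : String), Dom_old_macdonald name → Spec_old_macdonald name (old_macdonald name)

-- ===== LEMMAS AND PROOFS =====

-- From index 4 on, A's loop only appends lowercased characters.
lemma pvTailA (pre suf : List Char) (acc : List Char) (h4 : 4 ≤ pre.length) :
    (PySem.List.pyRange (pre.length : Int) ((pre ++ suf).length : Int) 1).foldl
      (pvBodyA (pre ++ suf)) acc = acc ++ suf.map PySem.Chars.lowerChar := by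
  induction suf generalizing pre acc with
  | nil =>
      rw [PySem.List.pyRange_one_eq_nil (by simp)]
      simp
  | cons x xs ih =>
      rw [PySem.List.pyRange_one_cons (by simp)]
      simp only [List.foldl_cons]
      have hb : pvBodyA (pre ++ x :: xs) acc (pre.length : Int)
          = acc ++ [PySem.Chars.lowerChar x] := by
        unfold pvBodyA
        rw [if_neg (by simp only [beq_iff_eq]; omega), if_neg (by simp only [beq_iff_eq]; omega)]
        rw [PySem.List.pyGetD_natCast]
        simp [List.getD_eq_getElem?_getD]
      rw [hb]
      have := ih (pre ++ [x]) (acc ++ [PySem.Chars.lowerChar x]) (by simp; omega)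
      simpa using this

-- ===== VERDICT (by name: the statement is the Claim_ definition above) =====
theorem old_macdonald_spec : Claim_equal_old_macdonald := by
  intro name _
  unfold Spec_old_macdonald old_macdonald old_macdonald_alt
  dsimp only
  rcases hcs : name.toList with _ | ⟨a, _ | ⟨b, _ | ⟨c, _ | ⟨d, rest⟩⟩⟩⟩
  · decide
  · simp [pvBodyA, PySem.List.pyRange, List.range_succ, PySem.List.pyGetD_ofNat',
      PySem.Chars.upper, PySem.Chars.lower, PySem.List.slice, PySem.List.clampIdx]
  · simp [pvBodyA, PySem.List.pyRange, List.range_succ, PySem.List.pyGetD_ofNat',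
      PySem.Chars.upper, PySem.Chars.lower, PySem.List.slice, PySem.List.clampIdx]
  · simp [pvBodyA, PySem.List.pyRange, List.range_succ, PySem.List.pyGetD_ofNat',
      PySem.Chars.upper, PySem.Chars.lower, PySem.List.slice, PySem.List.clampIdx]
  · rw [show a :: b :: c :: d :: rest = [a, b, c, d] ++ rest from rfl]
    rw [PySem.List.pyRange_one_append 0 4 (([a, b, c, d] ++ rest).length : Int)
      (by omega) (by simp only [List.length_append, List.length_cons, List.length_nil]; push_cast; omega)]
    rw [List.foldl_append, show PySem.List.pyRange 0 4 1 = [0, 1, 2, 3] from by decide]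
    have hpre : List.foldl (pvBodyA ([a, b, c, d] ++ rest)) [] [0, 1, 2, 3]
        = [PySem.Chars.upperChar a, PySem.Chars.lowerChar b,
           PySem.Chars.lowerChar c, PySem.Chars.upperChar d] := by
      simp [pvBodyA, PySem.List.pyGetD_ofNat']
    rw [hpre]
    have ht := pvTailA [a, b, c, d] rest
      [PySem.Chars.upperChar a, PySem.Chars.lowerChar b,
       PySem.Chars.lowerChar c, PySem.Chars.upperChar d] (by simp)
    simp only [List.cons_append, List.nil_append, List.length_cons] at ht ⊢
    push_cast at ht ⊢
    norm_num at ht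
    rw [ht]
    simp [PySem.Chars.upper, PySem.Chars.lower, PySem.List.slice, PySem.List.clampIdx]
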